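-- pv_equiv track=rewrite | github.com/GanschowJosh/Kattis | A Multiplication Game.py | solve
-- ===== SOURCE A (Python) =====
-- from functools import lru_cache
--
-- def mex(iter):
--   g= 0
--   s = set(iter)
--   while g in s:
--     g += 1
--   return g
--
-- def solve(n):
--   @lru_cache(maxsize=None)
--   def grundy(v):
--     if v >= n:
--       return 0
--     nxt = []
--     for m in range(2, 10):
--       u = v*m
--       nxt.append(0 if u >= n else grundy(u))
--     return mex(nxt)
--   return grundy(1)
-- ===== SOURCE B (Python) =====
-- def mex(iter):
--     g = 0
--     s = set(iter)
--     while g in s: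
--         g += 1
--     return g
--
--
-- def _gen(n, p, primes):
--     # all numbers p * (product of powers of `primes`) that are < n, each once
--     if p >= n:
--         return []
--     if not primes:
--         return [p]
--     return _gen(n, p, primes[1:]) + _gen(n, p * primes[0], primes)
--
--
-- def solve(n):
--     # reachable states from 1 (multiplying by 2..9, staying < n) = 7-smooth numbers < n;
--     # tabulate Grundy values bottom-up in decreasing order of state
--     states = _gen(n, 1, [2, 3, 5, 7])
--     grundy = {}
--     for v in sorted(states, reverse=True):
--         grundy[v] = mex(0 if v * m >= n else grundy[v * m] for m in range(2, 10))
--     return grundy.get(1, 0)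
-- ===== Notes on version B (the rewrite author's own statement) =====
-- stated objective: alternative
-- what changed: Replaces the top-down lru_cache-memoized recursion by explicit bottom-up tabulation: the reachable states (7-smooth numbers < n) are generated directly by a recursive product enumeration, sorted in decreasing order, and a Grundy table is filled so every child value already exists when needed.
import Mathlib
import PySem

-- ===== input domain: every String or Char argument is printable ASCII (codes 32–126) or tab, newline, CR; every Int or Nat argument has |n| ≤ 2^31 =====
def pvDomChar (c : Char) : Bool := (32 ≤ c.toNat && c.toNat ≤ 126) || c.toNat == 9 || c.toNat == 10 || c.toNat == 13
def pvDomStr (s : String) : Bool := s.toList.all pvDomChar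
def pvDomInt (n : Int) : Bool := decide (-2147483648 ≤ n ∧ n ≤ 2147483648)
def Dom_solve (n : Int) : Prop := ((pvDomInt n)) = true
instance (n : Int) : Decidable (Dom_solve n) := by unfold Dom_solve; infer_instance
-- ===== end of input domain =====

-- B replaces A's top-down memoized recursion by bottom-up tabulation over the explicitly
-- generated reachable states (alternative decomposition; same values, similar cost).

-- ===== PORT A =====
-- A's mex helper: g = 0; s = set(iter); while g in s: g += 1  (the Nat fuel |l|+1 only
-- bounds the loop, which increments g at most |s| ≤ |l| times before leaving s)
def mexGo (s : List Int) : Nat → Int → Int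
  | 0, g => g
  | f+1, g => if g ∈ s then mexGo s f (g+1) else g

def mexA (l : List Int) : Int := mexGo (PySem.Set.ofList l) (l.length + 1) 0

-- A's inner `grundy` with its lru_cache as an explicit dict threaded through the recursion;
-- the Nat fuel is only a totality guard (the call in `solve` supplies enough: depth ≤ n).
mutual
def grundyA (n : Int) (fuel : Nat) (v : Int) (c : PySem.Dict Int Int) :
    Int × PySem.Dict Int Int :=
  match fuel with
  | 0 => (0, c)
  | f+1 =>
    match PySem.Dict.get? c v with
    | some r => (r, c)
    | none =>
      if v ≥ n then (0, PySem.Dict.insert c v 0)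
      else
        let st := childA n f v (PySem.List.pyRange 2 10 1) ([], c)
        let r := mexA st.1
        (r, PySem.Dict.insert st.2 v r)
termination_by fuel * 10

def childA (n : Int) (f : Nat) (v : Int) (ms : List Int)
    (st : List Int × PySem.Dict Int Int) : List Int × PySem.Dict Int Int :=
  match ms with
  | [] => st
  | m :: ms' =>
    let u := v * m
    if u ≥ n then childA n f v ms' (st.1 ++ [(0 : Int)], st.2)
    else
      let rc := grundyA n f u st.2
      childA n f v ms' (st.1 ++ [rc.1], rc.2)
termination_by f * 10 + ms.length + 1
end

def solve (n : Int) : Int := (grundyA n (n.toNat + 1) 1 PySem.Dict.empty).1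

-- ===== PORT B =====
-- Source B's _gen: all p * (product of powers of `primes`) below n, each exactly once;
-- the Nat fuel is only a totality guard (depth ≤ n + 4 on the call `solve_alt` makes).
def genB (n : Int) : Nat → Int → List Int → List Int
  | 0, _, _ => []
  | f+1, p, primes =>
    if p ≥ n then []
    else
      match primes with
      | [] => [p]
      | q :: rest => genB n f p rest ++ genB n f (p * q) (q :: rest)

-- the body of Source B's `for v in sorted(states, reverse=True)` loop; Source B's grundy[v*m]
-- lookup is ported as getD with default 0, exact because the key is always present
-- (children are larger states, already tabulated — proved in B_fold below)
def stepB (n : Int) (d : PySem.Dict Int Int) (v : Int) : PySem.Dict Int Int :=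
  PySem.Dict.insert d v (mexA ((PySem.List.pyRange 2 10 1).map
    (fun m => if v * m ≥ n then (0 : Int) else PySem.Dict.getD d (v * m) 0)))

def solve_alt (n : Int) : Int :=
  let states := genB n (n.toNat + 5) 1 [2, 3, 5, 7]
  let g := (PySem.List.sorted states (fun x => x) true).foldl (stepB n) PySem.Dict.empty
  PySem.Dict.getD g 1 0

-- ===== PRECONDITION & SPEC =====
def Spec_solve (n : Int) (out : Int) : Prop := out = solve_alt n
instance (n : Int) (out : Int) : Decidable (Spec_solve n out) := by unfold Spec_solve; infer_instance

-- ===== CLAIM (what is proved, stated in full; the proofs are below) =====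
def Claim_equal_solve : Prop := ∀ (n : Int), Dom_solve n → Spec_solve n (solve n)

-- ===== LEMMAS AND PROOFS =====

-- Reference Grundy value, fuel-indexed (children computed at one fuel less)
def gF (n : Int) : Nat → Int → Int
  | 0, _ => 0
  | f+1, v =>
    if v ≥ n then 0
    else mexA ((PySem.List.pyRange 2 10 1).map
      (fun m => if v * m ≥ n then (0 : Int) else gF n f (v * m)))

def gf (n v : Int) : Int := gF n ((n - v).toNat + 1) v

lemma mem_range29 {m : Int} (h : m ∈ PySem.List.pyRange 2 10 1) : 2 ≤ m ∧ m ≤ 9 := by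
  have := PySem.List.mem_pyRange_one.mp h
  omega

lemma child_gt {v m : Int} (hv : 1 ≤ v) (hm : 2 ≤ m) : v < v * m := by nlinarith

lemma gF_stab (n : Int) : ∀ f v, 1 ≤ v → (n - v).toNat < f → gF n f v = gf n v := by
  intro f
  induction f using Nat.strong_induction_on with
  | _ f IH =>
    intro v hv hf
    match f, hf with
    | f'+1, hf =>
      unfold gf
      have h0 : (n - v).toNat + 1 = (n - v).toNat + 1 := rfl
      simp only [gF]
      by_cases hvn : v ≥ n
      · simp [hvn]
      · simp only [if_neg hvn]
        congr 1
        apply List.map_congr_left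
        intro m hm
        obtain ⟨hm2, hm9⟩ := mem_range29 hm
        by_cases hu : v * m ≥ n
        · simp [hu]
        · simp only [if_neg hu]
          have hgt : v < v * m := child_gt hv hm2
          have h1 : 1 ≤ v * m := by omega
          have h2 : (n - v * m).toNat < (n - v).toNat := by omega
          rw [IH f' (by omega) (v * m) h1 (by omega),
              IH ((n - v).toNat) (by omega) (v * m) h1 h2]

lemma gf_eq (n : Int) {v : Int} (hv : 1 ≤ v) :
    gf n v = if v ≥ n then 0
      else mexA ((PySem.List.pyRange 2 10 1).map
        (fun m => if v * m ≥ n then (0 : Int) else gf n (v * m))) := by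
  conv_lhs => rw [gf, gF]
  by_cases hvn : v ≥ n
  · simp [hvn]
  · simp only [if_neg hvn]
    congr 1
    apply List.map_congr_left
    intro m hm
    obtain ⟨hm2, hm9⟩ := mem_range29 hm
    by_cases hu : v * m ≥ n
    · simp [hu]
    · simp only [if_neg hu]
      have hgt : v < v * m := child_gt hv hm2
      exact gF_stab n ((n - v).toNat) (v * m) (by omega) (by omega)

def Sm : List Int → Int → Int → Prop
  | [], p, x => x = p
  | q :: rest, p, x => ∃ d : Nat, Sm rest (p * q ^ d) x

lemma Sm_le {qs : List Int} : ∀ {p x : Int}, Sm qs p x → 1 ≤ p →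
    (∀ q ∈ qs, 2 ≤ q) → p ≤ x := by
  induction qs with
  | nil => intro p x h _ _; simp [Sm] at h; omega
  | cons q rest ih =>
    intro p x h hp hq
    obtain ⟨d, hd⟩ := h
    have hq2 : 2 ≤ q := hq q (by simp)
    have hpow : 1 ≤ q ^ d := one_le_pow₀ (by omega)
    have h1 : p ≤ p * q ^ d := le_mul_of_one_le_right (by omega) hpow
    have h2 : 1 ≤ p * q ^ d := by omega
    exact le_trans h1 (ih hd h2 (fun q' hq' => hq q' (by simp [hq'])))

lemma gen_mem (n : Int) : ∀ (f : Nat) (qs : List Int) (p x : Int), (∀ q ∈ qs, 2 ≤ q) → 1 ≤ p →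
    (n - p).toNat + qs.length + 1 ≤ f →
    (x ∈ genB n f p qs ↔ (Sm qs p x ∧ x < n)) := by
  intro f
  induction f using Nat.strong_induction_on with
  | _ f IH =>
    intro qs p x hqs hp hf
    match f, hf with
    | f'+1, hf =>
      simp only [genB]
      by_cases hpn : p ≥ n
      · simp only [if_pos hpn, List.not_mem_nil, false_iff]
        rintro ⟨hsm, hxn⟩
        have := Sm_le hsm hp hqs
        omega
      · simp only [if_neg hpn]
        match qs with
        | [] => simp [Sm]; intro h; omega
        | q :: rest =>
          have hq2 : 2 ≤ q := hqs q (by simp)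
          have hrest : ∀ q' ∈ rest, 2 ≤ q' := fun q' h => hqs q' (by simp [h])
          have hpq : p + 1 ≤ p * q := by nlinarith
          have hpq1 : 1 ≤ p * q := by omega
          simp only [List.mem_append]
          rw [IH f' (by omega) rest p x hrest hp (by simp at hf ⊢; omega),
              IH f' (by omega) (q :: rest) (p * q) x hqs hpq1 (by simp at hf ⊢; omega)]
          constructor
          · rintro (⟨hs, hxn⟩ | ⟨⟨d, hd⟩, hxn⟩)
            · exact ⟨⟨0, by simpa using hs⟩, hxn⟩
            · refine ⟨⟨d + 1, ?_⟩, hxn⟩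
              have : p * q ^ (d + 1) = p * q * q ^ d := by ring
              rw [this]; exact hd
          · rintro ⟨⟨d, hd⟩, hxn⟩
            match d with
            | 0 => exact Or.inl ⟨by simpa using hd, hxn⟩
            | d+1 =>
              refine Or.inr ⟨⟨d, ?_⟩, hxn⟩
              have : p * q * q ^ d = p * q ^ (d + 1) := by ring
              rw [this]; exact hd

lemma Sm2357_iff {x : Int} : Sm [2, 3, 5, 7] 1 x ↔ ∃ a b c d : Nat, x = 2^a * 3^b * 5^c * 7^d := by
  simp only [Sm]
  constructor
  · rintro ⟨a, b, c, d, h⟩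
    exact ⟨a, b, c, d, by rw [h]; ring⟩
  · rintro ⟨a, b, c, d, h⟩
    exact ⟨a, b, c, d, by rw [h]; ring⟩

lemma Sm2357_pos {x : Int} (h : Sm [2, 3, 5, 7] 1 x) : 1 ≤ x := by
  obtain ⟨a, b, c, d, rfl⟩ := Sm2357_iff.mp h
  have hx : (0:Int) < 2^a * 3^b * 5^c * 7^d := by positivity
  omega

lemma Sm2357_closed {x m : Int} (h : Sm [2, 3, 5, 7] 1 x) (h2 : 2 ≤ m) (h9 : m ≤ 9) :
    Sm [2, 3, 5, 7] 1 (x * m) := by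
  obtain ⟨a, b, c, d, rfl⟩ := Sm2357_iff.mp h
  apply Sm2357_iff.mpr
  interval_cases m
  · exact ⟨a+1, b, c, d, by ring⟩
  · exact ⟨a, b+1, c, d, by ring⟩
  · exact ⟨a+2, b, c, d, by ring⟩
  · exact ⟨a, b, c+1, d, by ring⟩
  · exact ⟨a+1, b+1, c, d, by ring⟩
  · exact ⟨a, b, c, d+1, by ring⟩
  · exact ⟨a+3, b, c, d, by ring⟩
  · exact ⟨a, b+2, c, d, by ring⟩

lemma mem_keys_foldl_stepB (n : Int) : ∀ (l : List Int) (d : PySem.Dict Int Int) (k : Int),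
    k ∈ d.keys → k ∈ (l.foldl (stepB n) d).keys := by
  intro l
  induction l with
  | nil => intro d k h; simpa using h
  | cons v t ih =>
    intro d k h
    simp only [List.foldl_cons]
    exact ih _ k (by rw [stepB]; exact (PySem.Dict.mem_keys_insert _ _ _ _).mpr (Or.inr h))

lemma B_fold (n : Int) : ∀ (l : List Int) (d : PySem.Dict Int Int),
    l.Pairwise (fun a b => b ≤ a) →
    (∀ v ∈ l, 1 ≤ v ∧ v < n) →
    (∀ v ∈ l, ∀ m : Int, 2 ≤ m → m ≤ 9 → v * m < n →
      (d.get? (v * m) = some (gf n (v * m)) ∨ v * m ∈ l)) →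
    (∀ k r, d.get? k = some r → r = gf n k) →
    (∀ k r, (l.foldl (stepB n) d).get? k = some r → r = gf n k) ∧
    (∀ v ∈ l, (l.foldl (stepB n) d).get? v = some (gf n v)) := by
  intro l
  induction l with
  | nil => intro d _ _ _ hgood; exact ⟨hgood, by simp⟩
  | cons v t ih =>
    intro d hpw hb hch hgood
    obtain ⟨hv1, hvn⟩ := hb v (by simp)
    have htail : ∀ w ∈ t, w ≤ v := (List.pairwise_cons.mp hpw).1
    -- the value inserted for v is gf n v
    have hval : mexA ((PySem.List.pyRange 2 10 1).map
        (fun m => if v * m ≥ n then (0 : Int) else PySem.Dict.getD d (v * m) 0)) = gf n v := by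
      rw [gf_eq n hv1, if_neg (by omega)]
      congr 1
      apply List.map_congr_left
      intro m hm
      obtain ⟨hm2, hm9⟩ := mem_range29 hm
      by_cases hu : v * m ≥ n
      · simp [hu]
      · simp only [if_neg hu]
        have hgt : v < v * m := child_gt hv1 hm2
        rcases hch v (by simp) m hm2 hm9 (by omega) with hd | hl
        · exact PySem.Dict.getD_of_get?_eq_some _ 0 hd
        · exfalso
          rcases List.mem_cons.mp hl with h | h
          · omega
          · have := htail _ h; omega
    have hstep : stepB n d v = PySem.Dict.insert d v (gf n v) := by
      rw [stepB, hval]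
    have hgood' : ∀ k r, (PySem.Dict.insert d v (gf n v)).get? k = some r → r = gf n k := by
      intro k r hk
      rw [PySem.Dict.get?_insert] at hk
      split at hk
      · rename_i hkv; subst hkv; cases hk; rfl
      · exact hgood k r hk
    have hch' : ∀ w ∈ t, ∀ m : Int, 2 ≤ m → m ≤ 9 → w * m < n →
        ((PySem.Dict.insert d v (gf n v)).get? (w * m) = some (gf n (w * m)) ∨ w * m ∈ t) := by
      intro w hw m hm2 hm9 hwm
      rcases hch w (by simp [hw]) m hm2 hm9 hwm with hd | hl
      · left
        rw [PySem.Dict.get?_insert]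
        split
        · rename_i hkv; rw [hkv]
        · exact hd
      · rcases List.mem_cons.mp hl with h | h
        · left; rw [h, PySem.Dict.get?_insert, if_pos rfl]
        · right; exact h
    have := ih (PySem.Dict.insert d v (gf n v)) (List.pairwise_cons.mp hpw).2
      (fun w hw => hb w (by simp [hw])) hch' hgood'
    refine ⟨by simpa [List.foldl_cons, hstep] using this.1, ?_⟩
    intro w hw
    rcases List.mem_cons.mp hw with h | h
    · subst h
      -- w = v: the key survives the remaining inserts and the invariant fixes its value
      have hmem : w ∈ (t.foldl (stepB n) (PySem.Dict.insert d w (gf n w))).keys :=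
        mem_keys_foldl_stepB n t _ w ((PySem.Dict.mem_keys_insert _ _ _ _).mpr (Or.inl rfl))
      have hne : (t.foldl (stepB n) (PySem.Dict.insert d w (gf n w))).get? w ≠ none := by
        rw [ne_eq, PySem.Dict.get?_eq_none_iff_not_mem_keys _ _]
        simpa using hmem
      obtain ⟨r, hr⟩ := Option.ne_none_iff_exists'.mp hne
      have := this.1 w r hr
      simp only [List.foldl_cons, hstep]
      rw [hr, this]
    · simpa [List.foldl_cons, hstep] using this.2 w h

def GoodC (n : Int) (c : PySem.Dict Int Int) : Prop :=
  ∀ k r, c.get? k = some r → r = gf n k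

lemma childA_spec (n : Int) (f' : Nat) (v : Int) (hv : 1 ≤ v) (hvn : v < n)
    (hf : (n - v).toNat ≤ f')
    (IH : ∀ v' c', 1 ≤ v' → (n - v').toNat < f' → GoodC n c' →
      (grundyA n f' v' c').1 = gf n v' ∧ GoodC n (grundyA n f' v' c').2) :
    ∀ ms acc c₀, (∀ m ∈ ms, 2 ≤ m ∧ m ≤ 9) → GoodC n c₀ →
      (childA n f' v ms (acc, c₀)).1
        = acc ++ ms.map (fun m => if v * m ≥ n then (0 : Int) else gf n (v * m)) ∧
      GoodC n (childA n f' v ms (acc, c₀)).2 := by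
  intro ms
  induction ms with
  | nil => intro acc c₀ _ hg; simp [childA, hg]
  | cons m ms' ih =>
    intro acc c₀ hms hg
    obtain ⟨hm2, hm9⟩ := hms m (by simp)
    have hms' : ∀ m' ∈ ms', 2 ≤ m' ∧ m' ≤ 9 := fun m' h => hms m' (by simp [h])
    simp only [childA]
    by_cases hu : v * m ≥ n
    · simp only [if_pos hu]
      obtain ⟨h1, h2⟩ := ih (acc ++ [(0 : Int)]) c₀ hms' hg
      refine ⟨?_, h2⟩
      rw [h1]
      simp [hu]
    · simp only [if_neg hu]
      have hgt : v < v * m := child_gt hv hm2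
      obtain ⟨hr1, hr2⟩ := IH (v * m) c₀ (by omega) (by omega) hg
      obtain ⟨h1, h2⟩ := ih (acc ++ [(grundyA n f' (v * m) c₀).1]) _ hms' hr2
      refine ⟨?_, h2⟩
      rw [h1, hr1]
      simp [hu]

lemma A_main (n : Int) : ∀ f v c, 1 ≤ v → (n - v).toNat < f → GoodC n c →
    (grundyA n f v c).1 = gf n v ∧ GoodC n (grundyA n f v c).2 := by
  intro f
  induction f using Nat.strong_induction_on with
  | _ f IH =>
    intro v c hv hf hg
    match f, hf with
    | f'+1, hf =>
      have IH' : ∀ v' c', 1 ≤ v' → (n - v').toNat < f' → GoodC n c' →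
          (grundyA n f' v' c').1 = gf n v' ∧ GoodC n (grundyA n f' v' c').2 :=
        fun v' c' h1 h2 h3 => IH f' (by omega) v' c' h1 h2 h3
      simp only [grundyA]
      cases hc : PySem.Dict.get? c v with
      | some r => exact ⟨hg v r hc, hg⟩
      | none =>
        by_cases hvn : v ≥ n
        · simp only [if_pos hvn]
          refine ⟨?_, ?_⟩
          · rw [gf_eq n hv, if_pos hvn]
          · intro k r hk
            rw [PySem.Dict.get?_insert] at hk
            split at hk
            · rename_i hkv; subst hkv; cases hk
              rw [gf_eq n hv, if_pos hvn]
            · exact hg k r hk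
        · simp only [if_neg hvn]
          have hrange : ∀ m ∈ PySem.List.pyRange 2 10 1, 2 ≤ m ∧ m ≤ 9 :=
            fun m h => mem_range29 h
          obtain ⟨h1, h2⟩ := childA_spec n f' v hv (by omega) (by omega) IH'
            (PySem.List.pyRange 2 10 1) [] c hrange hg
          have hval : mexA (childA n f' v (PySem.List.pyRange 2 10 1) ([], c)).1 = gf n v := by
            rw [h1, List.nil_append, gf_eq n hv, if_neg hvn]
          refine ⟨hval, ?_⟩
          intro k r hk
          rw [PySem.Dict.get?_insert] at hk
          split at hk
          · rename_i hkv; subst hkv; cases hk; exact hval.symm ▸ rfl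
          · exact h2 k r hk

lemma solve_eq (n : Int) : solve n = solve_alt n := by
  have hempty : GoodC n PySem.Dict.empty := by
    intro k r hk
    simp [PySem.Dict.get?_empty] at hk
  have hA : solve n = gf n 1 :=
    (A_main n (n.toNat + 1) 1 PySem.Dict.empty (by omega) (by omega) hempty).1
  have hmemS : ∀ x : Int, x ∈ genB n (n.toNat + 5) 1 [2, 3, 5, 7]
      ↔ (Sm [2, 3, 5, 7] 1 x ∧ x < n) := by
    intro x
    exact gen_mem n (n.toNat + 5) [2, 3, 5, 7] 1 x (by norm_num) (by norm_num) (by simp)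
  rw [hA]
  unfold solve_alt
  by_cases hn : 1 < n
  · set states := genB n (n.toNat + 5) 1 [2, 3, 5, 7] with hst
    set L := PySem.List.sorted states (fun x => x) true with hL
    have hmemL : ∀ x : Int, x ∈ L ↔ (Sm [2, 3, 5, 7] 1 x ∧ x < n) := by
      intro x; rw [hL, PySem.List.mem_sorted]; exact hmemS x
    have hfold := B_fold n L PySem.Dict.empty
      (by simpa using PySem.List.sorted_pairwise_rev states (fun x => x))
      (by
        intro v hv
        obtain ⟨hs, hlt⟩ := (hmemL v).mp hv
        exact ⟨Sm2357_pos hs, hlt⟩)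
      (by
        intro v hv m hm2 hm9 hlt
        right
        obtain ⟨hs, _⟩ := (hmemL v).mp hv
        exact (hmemL (v * m)).mpr ⟨Sm2357_closed hs hm2 hm9, hlt⟩)
      hempty
    have h1 : (1 : Int) ∈ L :=
      (hmemL 1).mpr ⟨Sm2357_iff.mpr ⟨0, 0, 0, 0, by norm_num⟩, hn⟩
    exact (PySem.Dict.getD_of_get?_eq_some _ 0 (hfold.2 1 h1)).symm
  · have hstates : genB n (n.toNat + 5) 1 [2, 3, 5, 7] = [] := by
      apply List.eq_nil_iff_forall_not_mem.mpr
      intro x hx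
      obtain ⟨hs, hlt⟩ := (hmemS x).mp hx
      have := Sm2357_pos hs
      omega
    have hsort : PySem.List.sorted ([] : List Int) (fun x => x) true = [] := by
      simp [PySem.List.sorted_eq_nil_iff]
    show gf n 1 = PySem.Dict.getD (List.foldl (stepB n) PySem.Dict.empty
      (PySem.List.sorted (genB n (n.toNat + 5) 1 [2, 3, 5, 7]) (fun x => x) true)) 1 0
    rw [hstates, hsort]
    simp only [List.foldl_nil]
    rw [gf_eq n (by norm_num), if_pos (by omega)]
    simp [PySem.Dict.getD_empty]

-- ===== VERDICT (by name: the statement is the Claim_ definition above) =====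
theorem solve_spec : Claim_equal_solve := by
  intro n _
  exact solve_eq n
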